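-- pv_equiv track=rewrite | github.com/OhWonJu/Algorithm | N05Implementation/LOCKANDKEY.py | goLeft
-- ===== SOURCE A (Python) =====
-- def shift(key, direction):
--     start = 0 if direction == 1 else len(key)-1
--     stop = len(key)-1 if direction == 1 else 0
--
--     for i in range(start, stop, direction):
--       key[i] = key[i+direction]
--     key[-direction] = 0
--
-- def goLeft(key, lock):
--     lock_sum = sum(lock)
--     key_sum = sum(key)
--     while(key_sum != 0):
--       shift(key, 1)
--       key_sum = sum(key)
--       if key_sum + lock_sum == len(lock):
--         return True
--     return False
-- ===== SOURCE B (Python) =====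
-- def goLeft(key, lock):
--     # O(n) one-pass over running suffix sums; does not mutate key (A shifts key in place).
--     target = len(lock) - sum(lock)
--     s = sum(key)
--     if s == 0:
--         return False
--     for x in key:
--         s -= x
--         if s == target:
--             return True
--         if s == 0:
--             return False
--     return False
-- ===== Notes on version B (the rewrite author's own statement) =====
-- stated objective: faster
-- what changed: Replaces the repeated in-place shift-and-resum loop (O(n) work per iteration) with a single pass over running suffix sums against a precomputed target; B does not mutate key (equivalence is about the return value).
import Mathlib
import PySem

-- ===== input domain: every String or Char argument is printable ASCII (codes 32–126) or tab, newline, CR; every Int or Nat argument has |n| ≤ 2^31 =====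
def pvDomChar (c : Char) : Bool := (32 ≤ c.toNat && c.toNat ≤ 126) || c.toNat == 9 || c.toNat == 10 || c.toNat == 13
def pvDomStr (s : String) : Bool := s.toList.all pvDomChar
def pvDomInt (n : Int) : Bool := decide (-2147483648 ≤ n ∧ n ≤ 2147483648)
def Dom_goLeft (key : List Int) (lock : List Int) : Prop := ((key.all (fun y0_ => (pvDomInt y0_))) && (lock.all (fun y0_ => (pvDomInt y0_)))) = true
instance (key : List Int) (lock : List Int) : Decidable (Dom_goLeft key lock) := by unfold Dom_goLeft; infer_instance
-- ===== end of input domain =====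

-- B replaces A's repeated shift-and-resum (O(n^2)) by one pass over running suffix sums (O(n)).
-- A mutates key in place; B does not — the equivalence proved here is about the RETURN value only.

-- ===== PORT A =====
-- shift(key, 1): the in-place loop 'key[i] = key[i+1] for i in range(0, len-1)' followed by
-- 'key[-1] = 0' leaves exactly the left-shifted list with a trailing 0, i.e. key.drop 1 ++ [0].
def pvShift1 (key : List Int) : List Int := key.drop 1 ++ [0]

-- A's while loop: it performs at most key.length shifts (after that many shifts key is all
-- zeros, so key_sum = 0 and the loop exits); fuel = key.length is a pure termination guard.
def goLeftLoop (lockSum : Int) (lockLen : Int) (key : List Int) : Nat → Bool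
  | 0 => false
  | fuel + 1 =>
    if key.sum = 0 then false
    else
      let key' := pvShift1 key
      if key'.sum + lockSum = lockLen then true
      else goLeftLoop lockSum lockLen key' fuel

def goLeft (key : List Int) (lock : List Int) : Bool :=
  let lockSum := lock.sum
  if key.sum = 0 then false
  else goLeftLoop lockSum (lock.length : Int) key key.length

-- ===== PORT B =====
def goLeftAltLoop (target : Int) : List Int → Int → Bool
  | [], _ => false
  | x :: xs, s =>
    let s' := s - x
    if s' = target then true
    else if s' = 0 then false
    else goLeftAltLoop target xs s'

def goLeft_alt (key : List Int) (lock : List Int) : Bool :=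
  let target := (lock.length : Int) - lock.sum
  let s := key.sum
  if s = 0 then false
  else goLeftAltLoop target key s

-- ===== PRECONDITION & SPEC =====
def Spec_goLeft (key : List Int) (lock : List Int) (out : Bool) : Prop := out = goLeft_alt key lock
instance (key : List Int) (lock : List Int) (out : Bool) : Decidable (Spec_goLeft key lock out) := by unfold Spec_goLeft; infer_instance

-- ===== CLAIM (what is proved, stated in full; the proofs are below) =====
def Claim_equal_goLeft : Prop := ∀ (key : List Int) (lock : List Int), Dom_goLeft key lock → Spec_goLeft key lock (goLeft key lock)

-- ===== LEMMAS AND PROOFS =====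

-- Invariant: while the tail zs of the working list is all zeros, A's fuel loop computes
-- exactly B's suffix-sum scan over the prefix xs.
theorem goLeftLoop_eq (lockSum lockLen : Int) :
    ∀ (xs zs : List Int) (fuel : Nat), (∀ z ∈ zs, z = 0) → xs.length ≤ fuel →
      goLeftLoop lockSum lockLen (xs ++ zs) fuel =
        (if xs.sum = 0 then false
         else goLeftAltLoop (lockLen - lockSum) xs xs.sum) := by
  intro xs
  induction xs with
  | nil =>
    intro zs fuel hz _
    have hzs : zs.sum = 0 := List.sum_eq_zero hz
    simp only [List.nil_append, List.sum_nil]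
    cases fuel with
    | zero => rfl
    | succ f => simp [goLeftLoop, hzs]
  | cons x t ih =>
    intro zs fuel hz hlen
    cases fuel with
    | zero => simp at hlen
    | succ f =>
      have hzs : zs.sum = 0 := List.sum_eq_zero hz
      have hsum : ((x :: t) ++ zs).sum = x + t.sum := by
        simp [List.sum_append, hzs]
      by_cases h0 : x + t.sum = 0
      · simp only [goLeftLoop, hsum, List.sum_cons, if_pos h0]
      · have hshift : pvShift1 ((x :: t) ++ zs) = t ++ (zs ++ [0]) := by
          simp [pvShift1]
        have hsum' : (t ++ (zs ++ [0])).sum = t.sum := by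
          simp [List.sum_append, hzs]
        have hz' : ∀ z ∈ zs ++ [0], z = 0 := by
          intro z hzmem
          rcases List.mem_append.mp hzmem with h | h
          · exact hz z h
          · simpa using h
        have hlen' : t.length ≤ f := by simpa using hlen
        simp only [goLeftLoop, hsum, hshift, hsum', List.sum_cons, if_neg h0,
          goLeftAltLoop]
        by_cases hc : t.sum + lockSum = lockLen
        · have : x + t.sum - x = lockLen - lockSum := by omega
          simp [hc, this]
        · have hne : ¬ (x + t.sum - x = lockLen - lockSum) := by omega
          rw [if_neg hc, if_neg hne, ih (zs ++ [0]) f hz' hlen']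
          have hxx : x + t.sum - x = t.sum := by omega
          rw [hxx]

-- ===== VERDICT (by name: the statement is the Claim_ definition above) =====
theorem goLeft_spec : Claim_equal_goLeft := by
  intro key lock _
  unfold Spec_goLeft goLeft goLeft_alt
  by_cases h0 : key.sum = 0
  · simp [h0]
  · have := goLeftLoop_eq lock.sum (lock.length : Int) key [] key.length
      (by intro z hz; simp at hz) (by simp)
    simp only [List.append_nil] at this
    simp [h0, this]
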